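-- pv_equiv track=rewrite | github.com/Ivandosss/restaurant-orders | src/analyze_log.py | did_not_visit
-- ===== SOURCE A (Python) =====
-- def did_not_visit(array):
--     days = set()
--
--     unvisited_days = set()
--
--     for row in array:
--         days.add(row['dia'])
--         if row['nome'] == 'joao':
--             unvisited_days.add(row['dia'])
--
--     return days.difference(unvisited_days)
-- ===== SOURCE B (Python) =====
-- def did_not_visit(array):
--     return {row['dia'] for row in array
--             if not any(r['nome'] == 'joao' and r['dia'] == row['dia'] for r in array)}
-- ===== Notes on version B (the rewrite author's own statement) =====
-- stated objective: alternative
-- what changed: B drops A's two accumulated sets and final set difference: it is a single set comprehension keeping a day iff no row anywhere in the log records joao on that day, deciding each day by a nested scan of the whole log instead of maintained state.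
import Mathlib
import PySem

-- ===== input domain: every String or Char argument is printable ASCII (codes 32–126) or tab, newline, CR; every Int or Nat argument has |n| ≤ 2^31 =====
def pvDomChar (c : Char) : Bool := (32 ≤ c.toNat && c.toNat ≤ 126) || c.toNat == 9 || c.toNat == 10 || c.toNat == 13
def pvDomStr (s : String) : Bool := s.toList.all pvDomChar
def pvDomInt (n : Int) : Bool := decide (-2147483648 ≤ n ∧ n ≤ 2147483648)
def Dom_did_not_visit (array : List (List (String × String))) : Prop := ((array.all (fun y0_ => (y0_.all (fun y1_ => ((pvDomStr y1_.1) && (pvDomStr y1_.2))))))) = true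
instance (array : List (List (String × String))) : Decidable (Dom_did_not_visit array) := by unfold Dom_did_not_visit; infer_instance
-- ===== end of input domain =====

-- B replaces A's two accumulated sets and set difference by a set comprehension that keeps a
-- day iff no row anywhere records joao on that day (nested scan, no maintained state).

-- ===== PORT A =====
-- row['dia'] / row['nome'] raise KeyError when the key is missing; the port totalises
-- the lookup with getD "" — Pre_did_not_visit excludes exactly those inputs.
def didStepA (st : PySem.Set String × PySem.Set String) (row : List (String × String)) :
    PySem.Set String × PySem.Set String :=
  let d := (PySem.Dict.mk row).getD "dia" ""
  (PySem.Set.add st.1 d,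
   if (PySem.Dict.mk row).getD "nome" "" == "joao" then PySem.Set.add st.2 d else st.2)

def did_not_visit (array : List (List (String × String))) : List String :=
  let st := array.foldl didStepA (PySem.Set.empty, PySem.Set.empty)
  PySem.Set.diff st.1 st.2

-- ===== PORT B =====
-- any(r['nome'] == 'joao' and r['dia'] == row['dia'] for r in array)
def joaoAnywhere (array : List (List (String × String))) (day : String) : Bool :=
  array.any (fun r =>
    ((PySem.Dict.mk r).getD "nome" "" == "joao") && ((PySem.Dict.mk r).getD "dia" "" == day))

-- {row['dia'] for row in array if not any(...)} : a set comprehension is a fold adding the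
-- element whenever the condition holds.
def did_not_visit_alt (array : List (List (String × String))) : List String :=
  array.foldl (fun acc row =>
    if joaoAnywhere array ((PySem.Dict.mk row).getD "dia" "") then acc
    else PySem.Set.add acc ((PySem.Dict.mk row).getD "dia" "")) PySem.Set.empty

-- ===== PRECONDITION & SPEC =====
-- Pre_ excludes exactly the rows on which Python A raises KeyError ('dia' or 'nome' missing).
def Pre_did_not_visit (array : List (List (String × String))) : Prop :=
  (array.all (fun row => (PySem.Dict.mk row).contains "dia" && (PySem.Dict.mk row).contains "nome")) = true
instance (array : List (List (String × String))) : Decidable (Pre_did_not_visit array) := by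
  unfold Pre_did_not_visit; infer_instance

def pvWitness_did_not_visit : (List (List (String × String))) :=
  [[("dia", "mon"), ("nome", "ana")], [("dia", "tue"), ("nome", "joao")]]

def Spec_did_not_visit (array : List (List (String × String))) (out : List String) : Prop := out = did_not_visit_alt array
instance (array : List (List (String × String))) (out : List String) : Decidable (Spec_did_not_visit array out) := by unfold Spec_did_not_visit; infer_instance

-- ===== CLAIM (what is proved, stated in full; the proofs are below) =====
def Claim_equal_did_not_visit : Prop := ∀ (array : List (List (String × String))), Dom_did_not_visit array → Pre_did_not_visit array → Spec_did_not_visit array (did_not_visit array)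

-- ===== LEMMAS AND PROOFS =====

def pvDia (r : List (String × String)) : String := (PySem.Dict.mk r).getD "dia" ""
def pvJoao (r : List (String × String)) : Bool := ((PySem.Dict.mk r).getD "nome" "" == "joao")

-- A's joao-set after the fold: exactly the days of joao rows of the processed list.
theorem unv_mem (rest : List (List (String × String)))
    (days unv : PySem.Set String) (d : String) :
    d ∈ (rest.foldl didStepA (days, unv)).2 ↔
      d ∈ unv ∨ ∃ r ∈ rest, pvJoao r = true ∧ pvDia r = d := by
  induction rest generalizing days unv with
  | nil => simp
  | cons row rest ih =>
    simp only [List.foldl_cons, didStepA]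
    by_cases hj : pvJoao row = true
    · simp only [pvJoao] at hj
      rw [if_pos hj, ih]
      rw [PySem.Set.mem_add]
      constructor
      · rintro ((h | h) | ⟨r, hr, h1, h2⟩)
        · exact Or.inl h
        · exact Or.inr ⟨row, by simp, by simp [pvJoao, hj], h.symm⟩
        · exact Or.inr ⟨r, by simp [hr], h1, h2⟩
      · rintro (h | ⟨r, hr, h1, h2⟩)
        · exact Or.inl (Or.inl h)
        · rcases List.mem_cons.mp hr with h | h
          · subst h; exact Or.inl (Or.inr h2.symm)
          · exact Or.inr ⟨r, h, h1, h2⟩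
    · simp only [pvJoao] at hj
      rw [if_neg (by simpa using hj), ih]
      constructor
      · rintro (h | ⟨r, hr, h1, h2⟩)
        · exact Or.inl h
        · exact Or.inr ⟨r, by simp [hr], h1, h2⟩
      · rintro (h | ⟨r, hr, h1, h2⟩)
        · exact Or.inl h
        · rcases List.mem_cons.mp hr with h | h
          · subst h; simp [pvJoao, hj] at h1
          · exact Or.inr ⟨r, h, h1, h2⟩

-- B's fold is the filter (by "no joao on that day anywhere") of A's day set, in order.
theorem b_fold_filter (array : List (List (String × String)))
    (rest : List (List (String × String))) (acc days unv : PySem.Set String)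
    (hnd : days.Nodup)
    (hacc : acc = days.filter (fun x => !joaoAnywhere array x)) :
    rest.foldl (fun acc row =>
        if joaoAnywhere array ((PySem.Dict.mk row).getD "dia" "") then acc
        else PySem.Set.add acc ((PySem.Dict.mk row).getD "dia" "")) acc =
      ((rest.foldl didStepA (days, unv)).1).filter (fun x => !joaoAnywhere array x) ∧
    (rest.foldl didStepA (days, unv)).1.Nodup := by
  induction rest generalizing acc days unv with
  | nil => exact ⟨hacc, hnd⟩
  | cons row rest ih =>
    simp only [List.foldl_cons, didStepA]
    set d := (PySem.Dict.mk row).getD "dia" "" with hd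
    have hnd' : (PySem.Set.add days d).Nodup := by exact PySem.Set.nodup_add _ _ hnd
    refine ih _ _ (if pvJoao row then PySem.Set.add unv d else unv) hnd' ?_
    by_cases hja : joaoAnywhere array d = true
    · rw [if_pos hja, hacc]
      rw [PySem.Set.add_eq_ite]
      split
      · rfl
      · rw [List.filter_append]
        simp [hja]
    · rw [if_neg (by simp [hja]), hacc]
      by_cases hmem : d ∈ days
      · rw [PySem.Set.add_of_mem hmem]
        have : d ∈ days.filter (fun x => !joaoAnywhere array x) := by
          rw [List.mem_filter]; exact ⟨hmem, by simp [hja]⟩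
        rw [PySem.Set.add_of_mem this]
      · rw [PySem.Set.add_of_not_mem hmem]
        have : d ∉ days.filter (fun x => !joaoAnywhere array x) := fun h =>
          hmem (List.mem_filter.mp h).1
        rw [PySem.Set.add_of_not_mem this, List.filter_append]
        simp [hja]

-- A's joao-set membership test coincides with B's nested scan.
theorem contains_unv_eq (array : List (List (String × String))) (d : String) :
    PySem.Set.contains ((array.foldl didStepA (PySem.Set.empty, PySem.Set.empty)).2) d =
      joaoAnywhere array d := by
  have h := unv_mem array PySem.Set.empty PySem.Set.empty d
  by_cases hj : joaoAnywhere array d = true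
  · rw [hj]
    rw [PySem.Set.contains_eq_listContains]
    refine List.contains_iff_mem.mpr ?_
    rw [h]
    right
    rcases List.any_eq_true.mp hj with ⟨r, hr, hp⟩
    rw [Bool.and_eq_true] at hp
    refine ⟨r, hr, hp.1, by simpa [pvDia] using hp.2⟩
  · have hj' : joaoAnywhere array d = false := by simpa using hj
    rw [hj']
    rw [PySem.Set.contains_eq_listContains]
    rw [← Bool.not_eq_true, List.contains_iff_mem]
    rw [h]
    rintro (hc | ⟨r, hr, h1, h2⟩)
    · simp [PySem.Set.empty] at hc
    · apply hj
      refine List.any_eq_true.mpr ⟨r, hr, ?_⟩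
      simp [pvJoao] at h1
      simp [pvDia] at h2
      simp [h1, h2]

-- ===== VERDICT (by name: the statement is the Claim_ definition above) =====
theorem did_not_visit_spec : Claim_equal_did_not_visit := by
  intro array _ _
  show did_not_visit array = did_not_visit_alt array
  obtain ⟨hB, hnd⟩ :=
    b_fold_filter array array PySem.Set.empty PySem.Set.empty PySem.Set.empty
      (by simp [PySem.Set.empty]) (by simp [PySem.Set.empty])
  unfold did_not_visit did_not_visit_alt
  rw [hB]
  have hdiff : PySem.Set.diff (array.foldl didStepA (PySem.Set.empty, PySem.Set.empty)).1
      (array.foldl didStepA (PySem.Set.empty, PySem.Set.empty)).2 =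
      ((array.foldl didStepA (PySem.Set.empty, PySem.Set.empty)).1).filter
        (fun x => !PySem.Set.contains (array.foldl didStepA (PySem.Set.empty, PySem.Set.empty)).2 x) := rfl
  rw [hdiff]
  exact List.filter_congr (fun x _ => by rw [contains_unv_eq])
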